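-- pv_equiv track=rewrite | github.com/thecode00/Algorithm-Problem-Solve | Programmers/Python3/Level 1/둘만의 암호/solution.py | solution
-- ===== SOURCE A (Python) =====
-- def solution(s, skip, index):
--     skip = set(skip)
--     result = []
--     for char in s:
--         ascii_char = ord(char)
--         plus = index
--         while plus > 0:
--             # a의 아스키코드가 97이므로 현재 아스키코드에서 1을 더한값에서 97을뺀후 알파벳 개수인 26 나머지연산을 함
--             ascii_char = (ascii_char + 1 - 97) % 26 + 97
--             if chr(ascii_char) not in skip:  # skip에 현재 알파벳이 없을때만 plus 숫자를 줄임
--                 plus -= 1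
--         result.append(chr(ascii_char))
--
--     return "".join(result)
-- ===== SOURCE B (Python) =====
-- def solution(s, skip, index):
--     if index <= 0:
--         return s
--     banned = set(skip)
--     allowed = [p for p in range(26) if chr(97 + p) not in banned]
--     m = len(allowed)
--     rank = [sum(1 for q in range(p) if chr(97 + q) not in banned) for p in range(26)]
--     res = []
--     for ch in s:
--         p0 = (ord(ch) + 1 - 97) % 26
--         res.append(chr(97 + allowed[(rank[p0] + index - 1) % m]))
--     return "".join(res)
-- ===== Notes on version B (the rewrite author's own statement) =====
-- stated objective: faster
-- what changed: Replaces A's per-character while-loop that steps the alphabet one letter at a time index times with a precomputed allowed-position list and rank table plus one modular jump per character.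
import Mathlib
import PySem

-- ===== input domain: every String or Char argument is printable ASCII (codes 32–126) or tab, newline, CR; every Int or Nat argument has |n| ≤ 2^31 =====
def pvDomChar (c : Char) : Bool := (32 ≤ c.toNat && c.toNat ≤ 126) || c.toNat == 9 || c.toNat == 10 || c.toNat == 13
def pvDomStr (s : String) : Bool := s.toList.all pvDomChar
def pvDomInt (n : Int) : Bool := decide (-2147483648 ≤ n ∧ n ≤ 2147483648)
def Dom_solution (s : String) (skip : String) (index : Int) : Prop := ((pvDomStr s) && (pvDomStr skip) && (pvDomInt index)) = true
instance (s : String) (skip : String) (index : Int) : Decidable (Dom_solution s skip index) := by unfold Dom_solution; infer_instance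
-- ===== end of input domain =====

-- B replaces A's per-character stepping loop (one alphabet step at a time, `index` counted steps)
-- by a precomputed allowed-position list with a rank table and a single modular jump per character.

-- ===== PORT A =====
-- chr(n) for the codes this program produces (exact there)
def chrI (n : Int) : Char := Char.ofNat n.toNat

-- the inner `while plus > 0` loop; fuel 26*plus suffices whenever some letter is allowed
-- (each decrement of plus takes at most 26 steps), i.e. on every input admitted by Pre_solution
def loopA (banned : PySem.Set Char) (ascii : Int) (plus : Int) : Nat → Int
  | 0 => ascii
  | f + 1 =>
    if 0 < plus then
      let a' := PySem.Int.mod (ascii + 1 - 97) 26 + 97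
      if PySem.Set.contains banned (chrI a') then loopA banned a' plus f
      else loopA banned a' (plus - 1) f
    else ascii

def solution (s : String) (skip : String) (index : Int) : String :=
  let banned : PySem.Set Char := PySem.Set.ofList skip.toList
  String.ofList (s.toList.map (fun c => chrI (loopA banned (c.toNat : Int) index (26 * index.toNat))))

-- ===== PORT B =====
def solution_alt (s : String) (skip : String) (index : Int) : String :=
  if index ≤ 0 then s
  else
    let banned : PySem.Set Char := PySem.Set.ofList skip.toList
    let allowed : List Nat := (List.range 26).filter (fun p => !(PySem.Set.contains banned (Char.ofNat (97 + p))))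
    let m : Nat := allowed.length
    let rank : List Nat := (List.range 26).map (fun p => ((List.range p).filter (fun q => !(PySem.Set.contains banned (Char.ofNat (97 + q))))).length)
    String.ofList (s.toList.map (fun ch =>
      let p0 : Int := PySem.Int.mod ((ch.toNat : Int) + 1 - 97) 26
      let j : Int := PySem.Int.mod (((PySem.List.pyGetD rank p0 0 : Nat) : Int) + index - 1) (m : Int)
      Char.ofNat (97 + PySem.List.pyGetD allowed j 0)))

-- ===== PRECONDITION & SPEC =====
-- Pre_ excludes only the inputs where A never returns: a positive index with a nonempty s while
-- every lowercase letter is in skip makes A's while-loop spin forever (B raises ZeroDivisionError there).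
def Pre_solution (s : String) (skip : String) (index : Int) : Prop :=
  0 < index → s ≠ "" → ∃ p ∈ List.range 26, Char.ofNat (97 + p) ∉ skip.toList
instance (s : String) (skip : String) (index : Int) : Decidable (Pre_solution s skip index) := by
  unfold Pre_solution; infer_instance

def pvWitness_solution : String × String × Int := ("hi", "b", 2)

def Spec_solution (s : String) (skip : String) (index : Int) (out : String) : Prop := out = solution_alt s skip index
instance (s : String) (skip : String) (index : Int) (out : String) : Decidable (Spec_solution s skip index out) := by unfold Spec_solution; infer_instance

-- ===== CLAIM (what is proved, stated in full; the proofs are below) =====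
def Claim_equal_solution : Prop := ∀ (s : String) (skip : String) (index : Int), Dom_solution s skip index → Pre_solution s skip index → Spec_solution s skip index (solution s skip index)

-- ===== LEMMAS AND PROOFS =====

-- `rank` of the next position, in terms of `rank p` and whether p is allowed
lemma rank_succ (g : Nat → Bool) (p : Nat) :
    ((List.range (p+1)).filter g).length
      = ((List.range p).filter g).length + (if g p then 1 else 0) := by
  rw [List.range_succ, List.filter_append]
  cases h : g p <;> simp [h]

-- the element of the filtered range at index `rank p` is p itself, when g p holds
lemma get_rank (g : Nat → Bool) (n p : Nat) (hp : p < n) (hg : g p = true) :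
    ((List.range n).filter g)[((List.range p).filter g).length]? = some p := by
  induction n with
  | zero => omega
  | succ n ih =>
    rw [List.range_succ, List.filter_append]
    rcases Nat.lt_or_ge p n with h | h
    · have hmem : p ∈ (List.range n).filter g := by
        simp [List.mem_filter, List.mem_range]; exact ⟨h, hg⟩
      have hlt : ((List.range p).filter g).length < ((List.range n).filter g).length := by
        have h1 : ((List.range (p+1)).filter g).Sublist ((List.range n).filter g) :=
          (List.range_sublist.mpr (by omega)).filter g
        have h2 := h1.length_le
        rw [rank_succ] at h2; simp [hg] at h2; omega
      rw [List.getElem?_append_left hlt]; exact ih h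
    · have hpn : p = n := by omega
      subst hpn
      rw [List.getElem?_append_right (le_refl _)]
      simp [List.filter, hg]

lemma rank_lt (g : Nat → Bool) (p : Nat) (hp : p < 26) (hg : g p = true) :
    ((List.range p).filter g).length < ((List.range 26).filter g).length := by
  have := get_rank g 26 p hp hg
  exact List.getElem?_eq_some_iff.mp this |>.1

-- allowed-letter predicate, allowed-position list and rank table of the proofs
def gB (banned : PySem.Set Char) (p : Nat) : Bool := !(PySem.Set.contains banned (Char.ofNat (97 + p)))
def LB (banned : PySem.Set Char) : List Nat := (List.range 26).filter (gB banned)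
def rkB (banned : PySem.Set Char) (p : Nat) : Nat := ((List.range p).filter (gB banned)).length

lemma loop_zero (banned : PySem.Set Char) (a : Int) (f : Nat) : loopA banned a 0 f = a := by
  cases f <;> simp [loopA]

lemma mem_LB (banned : PySem.Set Char) (q : Nat) (hq : q < 26) (hg : gB banned q = true) :
    q ∈ LB banned := by
  simp [LB, List.mem_filter, List.mem_range]; exact ⟨hq, hg⟩

lemma exists_d (banned : PySem.Set Char) (hm : 0 < (LB banned).length) (p : Nat) (hp : p < 26) :
    ∃ d, d ≤ 25 ∧ gB banned ((p + d) % 26) = true := by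
  obtain ⟨q, hq⟩ := List.exists_mem_of_length_pos hm
  have hq' : q < 26 ∧ gB banned q = true := by
    simpa [LB, List.mem_filter, List.mem_range] using hq
  refine ⟨(q + 26 - p) % 26, by omega, ?_⟩
  rw [show (p + (q + 26 - p) % 26) % 26 = q by omega]
  exact hq'.2

lemma rk_step (banned : PySem.Set Char) (p0 : Nat) (hp : p0 < 26) (hm : 0 < (LB banned).length) (x : Int) :
    PySem.Int.mod ((rkB banned ((p0 + 1) % 26) : Int) + x) ((LB banned).length : Int)
      = PySem.Int.mod ((rkB banned p0 : Int) + (if gB banned p0 then 1 else 0) + x) ((LB banned).length : Int) := by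
  rcases Nat.lt_or_ge p0 25 with h | h
  · rw [Nat.mod_eq_of_lt (by omega)]
    have := rank_succ (gB banned) p0
    congr 1
    rw [show rkB banned (p0 + 1) = ((List.range (p0+1)).filter (gB banned)).length from rfl, this]
    unfold rkB
    split_ifs <;> push_cast <;> ring
  · have hp25 : p0 = 25 := by omega
    subst hp25
    have h0 : rkB banned (26 % 26) = 0 := by simp [rkB]
    have hmL : ((LB banned).length : Int) = (rkB banned 25 : Int) + (if gB banned 25 then 1 else 0) := by
      have := rank_succ (gB banned) 25
      rw [show (LB banned).length = ((List.range 26).filter (gB banned)).length from rfl, this]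
      unfold rkB
      split_ifs <;> push_cast <;> ring
    rw [h0, hmL]
    have hmpos : (0:Int) < (rkB banned 25 : Int) + (if gB banned 25 then 1 else 0) := by
      rw [← hmL]; exact_mod_cast hm
    rw [PySem.Int.mod_eq_emod_of_pos hmpos, PySem.Int.mod_eq_emod_of_pos hmpos]
    rw [show (rkB banned 25 : Int) + (if gB banned 25 then 1 else 0) + x
          = ((0:Int) + x) + ((rkB banned 25 : Int) + (if gB banned 25 then 1 else 0)) * 1 by ring]
    rw [Int.add_mul_emod_self_left]
    norm_num

lemma getD_LB_rk (banned : PySem.Set Char) (p : Nat) (hp : p < 26) (hg : gB banned p = true) :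
    (LB banned).getD (rkB banned p) 0 = p := by
  rw [List.getD_eq_getElem?_getD, show rkB banned p = ((List.range p).filter (gB banned)).length from rfl]
  rw [show LB banned = (List.range 26).filter (gB banned) from rfl]
  rw [get_rank (gB banned) 26 p hp hg]
  rfl

-- the closed form of A's inner loop: starting anywhere, with enough fuel, the result is
-- 97 + allowed[(rank(p0) + plus - 1) mod m]
lemma loop_closed (banned : PySem.Set Char) :
    ∀ (fuel : Nat) (a : Int) (n d : Nat), 1 ≤ n → d ≤ 25 →
      gB banned (((PySem.Int.mod (a + 1 - 97) 26).toNat + d) % 26) = true →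
      d + 1 + 26 * (n - 1) ≤ fuel →
      loopA banned a (n : Int) fuel
        = 97 + ((LB banned).getD (PySem.Int.mod ((rkB banned (PySem.Int.mod (a + 1 - 97) 26).toNat : Int) + n - 1) ((LB banned).length : Int)).toNat 0 : Int) := by
  intro fuel
  induction fuel with
  | zero => intro a n d hn hd hall hfuel; omega
  | succ f ih =>
    intro a n d hn hd hall hfuel
    have hmod0 : (0:Int) ≤ PySem.Int.mod (a + 1 - 97) 26 := PySem.Int.mod_nonneg _ (by norm_num)
    have hmodlt : PySem.Int.mod (a + 1 - 97) 26 < 26 := PySem.Int.mod_lt _ (by norm_num)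
    set p0 := (PySem.Int.mod (a + 1 - 97) 26).toNat with hp0def
    have hp026 : p0 < 26 := by omega
    have hcast : PySem.Int.mod (a + 1 - 97) 26 = (p0 : Int) := by omega
    have hm : 0 < (LB banned).length :=
      List.length_pos_of_mem (mem_LB banned ((p0 + d) % 26) (by omega) hall)
    have hnpos : (0:Int) < (n : Int) := by exact_mod_cast hn
    have hchr : chrI (PySem.Int.mod (a + 1 - 97) 26 + 97) = Char.ofNat (97 + p0) := by
      rw [hcast]; unfold chrI; congr 1; omega
    have hstep : (PySem.Int.mod (((p0:Int) + 97) + 1 - 97) 26).toNat = (p0 + 1) % 26 := by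
      have h1 : ((p0:Int) + 97) + 1 - 97 = ((p0 + 1 : Nat) : Int) := by push_cast; ring
      have h2 : PySem.Int.mod ((p0 + 1 : Nat) : Int) (26:Int) = (((p0 + 1) % 26 : Nat) : Int) := by
        exact_mod_cast PySem.Int.mod_natCast (p0 + 1) 26
      rw [h1]
      omega
    simp only [loopA, if_pos hnpos, hchr]
    have hcond : PySem.Set.contains banned (Char.ofNat (97 + p0)) = !(gB banned p0) := by
      simp [gB]
    rw [hcond, hcast]
    cases hgb : gB banned p0 with
    | false =>
      simp only [Bool.not_false, if_pos]
      have hd1 : 1 ≤ d := by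
        by_contra h
        have hd0 : d = 0 := by omega
        rw [hd0, Nat.add_zero, Nat.mod_eq_of_lt hp026] at hall
        rw [hall] at hgb; simp at hgb
      have hall' : gB banned (((PySem.Int.mod (((p0:Int) + 97) + 1 - 97) 26).toNat + (d - 1)) % 26) = true := by
        rw [hstep, show ((p0 + 1) % 26 + (d - 1)) % 26 = (p0 + d) % 26 by omega]
        exact hall
      rw [ih ((p0:Int) + 97) n (d - 1) hn (by omega) hall' (by omega), hstep]
      congr 2
      have := rk_step banned p0 hp026 hm ((n:Int) - 1)
      rw [hgb] at this
      rw [show (rkB banned ((p0+1)%26) : Int) + (n:Int) - 1 = (rkB banned ((p0+1)%26) : Int) + ((n:Int) - 1) by ring, this]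
      have harg : (rkB banned p0 : Int) + (if (false = true) then (1:Int) else 0) + ((n:Int) - 1) = (rkB banned p0 : Int) + (n:Int) - 1 := by
        simp
        ring
      rw [harg]
    | true =>
      simp only [Bool.not_true, if_neg Bool.false_ne_true]
      rcases Nat.lt_or_ge n 2 with hn1 | hn2
      · have hn1' : n = 1 := by omega
        subst hn1'
        rw [show ((1:Nat):Int) - 1 = 0 by norm_num, loop_zero]
        have hrklt : rkB banned p0 < (LB banned).length := rank_lt (gB banned) p0 hp026 hgb
        have hmodeq : PySem.Int.mod ((rkB banned p0 : Int) + ((1:Nat):Int) - 1) ((LB banned).length : Int) = (rkB banned p0 : Int) := by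
          rw [show (rkB banned p0 : Int) + ((1:Nat):Int) - 1 = ((rkB banned p0 : Nat) : Int) by push_cast; ring]
          have := PySem.Int.mod_natCast (rkB banned p0) (LB banned).length
          rw [this]
          rw [Nat.mod_eq_of_lt hrklt]
        rw [hmodeq]
        rw [show ((rkB banned p0 : Int)).toNat = rkB banned p0 by omega]
        rw [getD_LB_rk banned p0 hp026 hgb]
        ring
      · obtain ⟨d', hd', hall'⟩ := exists_d banned hm ((p0 + 1) % 26) (by omega)
        have hall'' : gB banned (((PySem.Int.mod (((p0:Int) + 97) + 1 - 97) 26).toNat + d') % 26) = true := by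
          rw [hstep]; exact hall'
        have hcastn : (n:Int) - 1 = ((n - 1 : Nat) : Int) := by omega
        rw [hcastn, ih ((p0:Int) + 97) (n - 1) d' (by omega) hd' hall'' (by omega), hstep]
        congr 2
        have := rk_step banned p0 hp026 hm (((n - 1 : Nat) : Int) - 1)
        rw [hgb] at this
        rw [show (rkB banned ((p0+1)%26) : Int) + ((n - 1 : Nat) : Int) - 1 = (rkB banned ((p0+1)%26) : Int) + (((n - 1 : Nat) : Int) - 1) by ring, this]
        have harg2 : (rkB banned p0 : Int) + (if (true = true) then (1:Int) else 0) + (((n - 1 : Nat) : Int) - 1) = (rkB banned p0 : Int) + (n:Int) - 1 := by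
          simp
          omega
        rw [harg2]

-- ===== VERDICT (by name: the statement is the Claim_ definition above) =====
lemma char_eq (skip : String) (index : Int) (hidx : 0 < index)
    (hm : 0 < (LB (PySem.Set.ofList skip.toList)).length) (c : Char) :
    chrI (loopA (PySem.Set.ofList skip.toList) (c.toNat : Int) index (26 * index.toNat))
      = Char.ofNat (97 + PySem.List.pyGetD
          ((List.range 26).filter (fun p => !(PySem.Set.contains (PySem.Set.ofList skip.toList) (Char.ofNat (97 + p)))))
          (PySem.Int.mod (((PySem.List.pyGetD
              ((List.range 26).map (fun p => ((List.range p).filter (fun q => !(PySem.Set.contains (PySem.Set.ofList skip.toList) (Char.ofNat (97 + q))))).length))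
              (PySem.Int.mod ((c.toNat : Int) + 1 - 97) 26) 0 : Nat) : Int) + index - 1)
            (((List.range 26).filter (fun p => !(PySem.Set.contains (PySem.Set.ofList skip.toList) (Char.ofNat (97 + p))))).length : Int))
          0) := by
  set banned := PySem.Set.ofList skip.toList with hbdef
  have hLeq : ((List.range 26).filter (fun p => !(PySem.Set.contains banned (Char.ofNat (97 + p))))) = LB banned := rfl
  have hrkeq : ((List.range 26).map (fun p => ((List.range p).filter (fun q => !(PySem.Set.contains banned (Char.ofNat (97 + q))))).length)) = (List.range 26).map (rkB banned) := rfl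
  rw [hLeq, hrkeq]
  have hmod0 : (0:Int) ≤ PySem.Int.mod ((c.toNat : Int) + 1 - 97) 26 := PySem.Int.mod_nonneg _ (by norm_num)
  have hmodlt : PySem.Int.mod ((c.toNat : Int) + 1 - 97) 26 < 26 := PySem.Int.mod_lt _ (by norm_num)
  set p0 := (PySem.Int.mod ((c.toNat : Int) + 1 - 97) 26).toNat with hp0def
  have hp026 : p0 < 26 := by omega
  have hcast : PySem.Int.mod ((c.toNat : Int) + 1 - 97) 26 = (p0 : Int) := by omega
  -- reduce B's rank lookup
  have hrk : PySem.List.pyGetD ((List.range 26).map (rkB banned)) (PySem.Int.mod ((c.toNat : Int) + 1 - 97) 26) 0 = rkB banned p0 := by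
    rw [hcast, PySem.List.pyGetD_natCast, PySem.List.getD_map_range _ _ _ _ hp026]
  rw [hrk]
  -- the closed form of A's loop
  have hn : 1 ≤ index.toNat := by omega
  have hncast : ((index.toNat : Nat) : Int) = index := Int.toNat_of_nonneg hidx.le
  obtain ⟨d, hd, hall⟩ := exists_d banned hm p0 hp026
  have hloop := loop_closed banned (26 * index.toNat) ((c.toNat : Int)) index.toNat d hn hd
    (by rw [← hp0def]; exact hall) (by omega)
  rw [hncast] at hloop
  rw [hloop]
  -- both sides are the same allowed-list entry
  have hj0 : (0:Int) ≤ PySem.Int.mod ((rkB banned p0 : Int) + index - 1) ((LB banned).length : Int) :=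
    PySem.Int.mod_nonneg _ (by exact_mod_cast hm)
  rw [PySem.List.pyGetD_of_nonneg _ _ hj0]
  unfold chrI
  congr 1

-- ===== VERDICT (by name: the statement is the Claim_ definition above) =====
theorem solution_spec : Claim_equal_solution := by
  intro s skip index hdom hpre
  unfold Spec_solution solution solution_alt
  by_cases hidx : index ≤ 0
  · rw [if_pos hidx]
    have h0 : index.toNat = 0 := Int.toNat_of_nonpos hidx
    rw [h0]
    simp [loopA, chrI, Char.ofNat_toNat]
  · rw [not_le] at hidx
    rw [if_neg (not_le.mpr hidx)]
    by_cases hs : s.toList = []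
    · rw [hs]; rfl
    · have hsne : s ≠ "" := by
        intro h; rw [h] at hs; exact hs rfl
      obtain ⟨p, hpmem, hpnin⟩ := hpre hidx hsne
      have hp26 : p < 26 := List.mem_range.mp hpmem
      have hg : gB (PySem.Set.ofList skip.toList) p = true := by
        simp [gB, hpnin]
      have hm : 0 < (LB (PySem.Set.ofList skip.toList)).length :=
        List.length_pos_of_mem (mem_LB _ p hp26 hg)
      exact congrArg String.ofList (List.map_congr_left (fun c _ => char_eq skip index hidx hm c))
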